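-- pv_equiv track=rewrite | github.com/hungyen0402/lap_trinh_python | PY01011_liet_ke_so_dep.py | solve
-- ===== SOURCE A (Python) =====
-- def solve(n):
--     if n % 2 != 0:
--         return False
--     x = n
--     m = 0
--     dem = 0
--     while n>1:
--         m = m * 10 + n % 10
--         n //= 10
--         if n % 2 != 0:
--             return False
--         dem += 1
--     if dem % 2 == 1:
--          return False
--     return m == x
-- ===== SOURCE B (Python) =====
-- def _digits(n):
--     return [n % 10] + _digits(n // 10) if n > 0 else []
--
-- def solve(n):
--     if n <= 0:
--         return False
--     ds = _digits(n)
--     return len(ds) % 2 == 0 and all(d % 2 == 0 for d in ds) and ds == ds[::-1]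
-- ===== Notes on version B (the rewrite author's own statement) =====
-- stated objective: simpler
-- what changed: B extracts the digit list once and then checks the three properties (even digit count, all digits even, palindrome) as independent whole-list tests, instead of A's single fused loop that rebuilds a reversed integer while re-testing the parity of every remaining prefix, counting iterations, and early-returning.
-- intended difference: For n == 0 A returns True (its loop never runs, so the leftover m == x check holds vacuously) while B returns False, the intended value since 0 has one digit and the property requires an even digit count. — e.g. on solve(0): A returns true, B returns false
import Mathlib
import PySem

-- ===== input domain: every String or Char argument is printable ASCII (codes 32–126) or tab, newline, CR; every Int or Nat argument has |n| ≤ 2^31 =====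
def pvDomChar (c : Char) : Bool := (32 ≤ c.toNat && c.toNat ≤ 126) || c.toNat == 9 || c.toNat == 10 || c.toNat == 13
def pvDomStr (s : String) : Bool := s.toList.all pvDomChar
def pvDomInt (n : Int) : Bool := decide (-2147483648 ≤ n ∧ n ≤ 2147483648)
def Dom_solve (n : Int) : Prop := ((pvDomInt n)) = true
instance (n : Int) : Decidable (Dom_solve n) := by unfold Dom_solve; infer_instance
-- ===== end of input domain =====

-- B checks the digit list (even length, all-even digits, palindrome) instead of A's fused
-- reversal loop; objective: simpler, same cost.

-- ===== PORT A =====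
-- the while loop of A: state (n, m, dem), x fixed; early `return False` stays a branch
def solveLoopA (x n m dem : Int) : Bool :=
  if h : 1 < n then
    let m' := m * 10 + PySem.Int.mod n 10
    let n' := PySem.Int.floordiv n 10
    if PySem.Int.mod n' 2 ≠ 0 then false
    else solveLoopA x n' m' (dem + 1)
  else if PySem.Int.mod dem 2 = 1 then false
  else decide (m = x)
termination_by n.toNat
decreasing_by
  have h10 : PySem.Int.floordiv n 10 = n / 10 := by simp [PySem.Int.floordiv, Int.fdiv_eq_ediv]
  simp only [h10]
  omega

def solve (n : Int) : Bool :=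
  if PySem.Int.mod n 2 ≠ 0 then false
  else solveLoopA n n 0 0

-- ===== PORT B =====
-- _digits: low-order digit first
def digitsB (n : Int) : List Int :=
  if _h : 0 < n then PySem.Int.mod n 10 :: digitsB (PySem.Int.floordiv n 10) else []
termination_by n.toNat
decreasing_by
  have h10 : PySem.Int.floordiv n 10 = n / 10 := by simp [PySem.Int.floordiv, Int.fdiv_eq_ediv]
  simp only [h10]
  omega

def solve_alt (n : Int) : Bool :=
  if n ≤ 0 then false
  else
    -- ds := digitsB n; ds[::-1] is ds.reverse (PySem.List.slice?_none_none_neg_one)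
    decide (((digitsB n).length : Int) % 2 = 0)
      && (digitsB n).all (fun d => PySem.Int.mod d 2 = 0)
      && decide (digitsB n = (digitsB n).reverse)

-- ===== PRECONDITION & SPEC =====
-- For n == 0 A returns True (its loop never runs, so the leftover `m == x` check holds
-- vacuously) while B returns False, the intended value: 0 has one digit and the property
-- requires an even digit count.
def D_solve (n : Int) : Prop := n = 0
instance (n : Int) : Decidable (D_solve n) := by unfold D_solve; infer_instance
def Spec_solve (n : Int) (out : Bool) : Prop := ¬ D_solve n → out = solve_alt n
instance (n : Int) (out : Bool) : Decidable (Spec_solve n out) := by unfold Spec_solve; infer_instance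
def pvDiffWitness_solve : Int := 0
def pvDiffWitnessOut_solve : Bool × Bool := (true, false)

-- ===== CLAIM (what is proved, stated in full; the proofs are below) =====
def Claim_unchanged_solve : Prop := ∀ (n : Int), Dom_solve n → Spec_solve n (solve n)
def Claim_changed_solve : Prop := Dom_solve (pvDiffWitness_solve) ∧ D_solve (pvDiffWitness_solve) ∧ solve (pvDiffWitness_solve) = pvDiffWitnessOut_solve.1 ∧ solve_alt (pvDiffWitness_solve) = pvDiffWitnessOut_solve.2 ∧ pvDiffWitnessOut_solve.1 ≠ pvDiffWitnessOut_solve.2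
def Claim_exact_solve : Prop := ∀ (n : Int), Dom_solve n → D_solve n → solve n ≠ solve_alt n

-- ===== LEMMAS AND PROOFS =====

theorem floordiv10 (n : Int) : PySem.Int.floordiv n 10 = n / 10 := by
  simp [PySem.Int.floordiv, Int.fdiv_eq_ediv]

theorem mod_pos' (n b : Int) (hb : 0 < b) : PySem.Int.mod n b = n % b := by
  simp [PySem.Int.mod, Int.fmod_eq_emod, Int.le_of_lt hb]

theorem mod_two (n : Int) : PySem.Int.mod n 2 = n % 2 := mod_pos' n 2 (by norm_num)

theorem mod_ten (n : Int) : PySem.Int.mod n 10 = n % 10 := mod_pos' n 10 (by norm_num)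

-- value of a low-order-first digit list
def fromDigits : List Int → Int
  | [] => 0
  | d :: ds => d + 10 * fromDigits ds

theorem digitsB_eq (n : Int) :
    digitsB n = if 0 < n then n % 10 :: digitsB (n / 10) else [] := by
  rw [digitsB]
  split_ifs with h
  · rw [mod_ten n, floordiv10]
  · rfl

theorem digitsB_zero_of_nonpos (n : Int) (h : n ≤ 0) : digitsB n = [] := by
  rw [digitsB_eq]; simp [not_lt.mpr h]

theorem digitsB_bounds (n : Int) : ∀ d ∈ digitsB n, 0 ≤ d ∧ d < 10 := by
  induction n using digitsB.induct with
  | case1 n h ih =>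
    rw [digitsB_eq, if_pos h]
    intro d hd
    rcases List.mem_cons.mp hd with rfl | hd
    · constructor <;> omega
    · rw [floordiv10] at ih; exact ih d hd
  | case2 n h =>
    rw [digitsB_eq, if_neg h]; intro d hd; simp at hd

theorem fromDigits_digitsB (n : Int) (hn : 0 ≤ n) : fromDigits (digitsB n) = n := by
  induction n using digitsB.induct with
  | case1 n h ih =>
    rw [digitsB_eq, if_pos h, fromDigits]
    rw [floordiv10] at ih
    rw [ih (by positivity)]
    omega
  | case2 n h =>
    rw [digitsB_eq, if_neg h, fromDigits]; omega

theorem fromDigits_append (ds : List Int) (d : Int) :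
    fromDigits (ds ++ [d]) = fromDigits ds + d * 10 ^ ds.length := by
  induction ds with
  | nil => simp [fromDigits]
  | cons e ds ih => simp [fromDigits, ih]; ring

theorem revAcc_eq (ds : List Int) : ∀ m : Int,
    ds.foldl (fun a d => a * 10 + d) m = m * 10 ^ ds.length + fromDigits ds.reverse := by
  induction ds with
  | nil => intro m; simp [fromDigits]
  | cons d ds ih =>
    intro m
    simp only [List.foldl_cons, List.reverse_cons, ih, fromDigits_append,
      List.length_cons, List.length_reverse]
    ring

theorem fromDigits_inj : ∀ (ds es : List Int), ds.length = es.length →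
    (∀ d ∈ ds, 0 ≤ d ∧ d < 10) → (∀ e ∈ es, 0 ≤ e ∧ e < 10) →
    fromDigits ds = fromDigits es → ds = es := by
  intro ds
  induction ds with
  | nil => intro es hlen _ _ _; cases es with
    | nil => rfl
    | cons e es => simp at hlen
  | cons d ds ih =>
    intro es hlen hds hes heq
    cases es with
    | nil => simp at hlen
    | cons e es =>
      simp only [fromDigits] at heq
      have hd := hds d (by simp)
      have he := hes e (by simp)
      have hde : d = e ∧ fromDigits ds = fromDigits es := by constructor <;> omega
      have := ih es (by simpa using hlen)
        (fun x hx => hds x (by simp [hx])) (fun x hx => hes x (by simp [hx])) hde.2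
      simp [hde.1, this]

-- oddness of a remaining prefix = oddness of its low digit
theorem allEven_shift (n : Int) (h0 : 0 ≤ n) (he : n % 2 = 0) :
    (digitsB n).all (fun d => decide (d % 2 = 0)) =
    (digitsB (n / 10)).all (fun d => decide (d % 2 = 0)) := by
  by_cases h : 0 < n
  · rw [digitsB_eq, if_pos h]
    simp only [List.all_cons]
    have : n % 10 % 2 = 0 := by omega
    simp [this]
  · have : n = 0 := by omega
    subst this
    norm_num

-- characterisation of A's loop for even, nonnegative n
theorem loopA_spec : ∀ (k : Nat) (n : Int), n.toNat ≤ k → 0 ≤ n → n % 2 = 0 →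
    ∀ (x m dem : Int),
    solveLoopA x n m dem =
      if (digitsB (n / 10)).all (fun d => decide (d % 2 = 0)) then
        (if (dem + (digitsB n).length) % 2 = 1 then false
         else decide ((digitsB n).foldl (fun a d => a * 10 + d) m = x))
      else false := by
  intro k
  induction k with
  | zero =>
    intro n hk h0 he x m dem
    have hn : n = 0 := by omega
    subst hn
    rw [solveLoopA]
    norm_num [digitsB_zero_of_nonpos, mod_pos' _ 2 (by norm_num)]
  | succ k ih =>
    intro n hk h0 he x m dem
    by_cases h1 : 1 < n
    · rw [solveLoopA, dif_pos h1]
      simp only [floordiv10, mod_pos' _ 2 (by norm_num : (0:Int) < 2),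
        mod_pos' _ 10 (by norm_num : (0:Int) < 10)]
      by_cases hodd : n / 10 % 2 ≠ 0
      · rw [if_pos (by exact hodd)]
        have hpos : 0 < n / 10 := by omega
        rw [digitsB_eq (n / 10), if_pos hpos]
        have hd : ¬ (n / 10 % 10 % 2 = 0) := by omega
        have hc : ¬ (((n / 10 % 10 :: digitsB (n / 10 / 10)).all fun d => decide (d % 2 = 0)) = true) := by
          simp only [List.all_cons, Bool.and_eq_true, decide_eq_true_eq]
          intro hcc; exact hd hcc.1
        rw [if_neg hc]
      · rw [if_neg hodd]
        have hodd' : n / 10 % 2 = 0 := by omega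
        have h0' : 0 ≤ n / 10 := by omega
        have := ih (n / 10) (by omega) h0' hodd' x (m * 10 + n % 10) (dem + 1)
        rw [this]
        rw [allEven_shift (n / 10) h0' hodd']
        rw [digitsB_eq n, if_pos (by omega : 0 < n)]
        simp only [List.length_cons, List.foldl_cons]
        have : (dem + 1 + ((digitsB (n / 10)).length : Int)) =
               (dem + (((digitsB (n / 10)).length : Int) + 1)) := by ring
        rw [this]
        push_cast
        rfl
    · -- n ≤ 1 and even and ≥ 0 ⇒ n = 0
      have hn : n = 0 := by omega
      subst hn
      rw [solveLoopA]
      norm_num [digitsB_zero_of_nonpos, mod_pos' _ 2 (by norm_num)]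

theorem solve_neg (n : Int) (h : n < 0) : solve n = false := by
  unfold solve
  rw [mod_two]
  by_cases he : n % 2 = 0
  · rw [if_neg (by simp [he])]
    rw [solveLoopA, dif_neg (by omega), mod_two]
    have h2 : ¬ ((0:Int) % 2 = 1) := by omega
    rw [if_neg h2]
    simp only [decide_eq_false_iff_not]
    omega
  · rw [if_pos (by simp [he])]

theorem alt_odd (n : Int) (hpos : 0 < n) (hodd : n % 2 = 1) : solve_alt n = false := by
  unfold solve_alt
  rw [if_neg (by omega)]
  rw [digitsB_eq n, if_pos hpos]
  simp only [List.all_cons, mod_two]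
  have hd : decide (n % 10 % 2 = 0) = false := by
    rw [decide_eq_false_iff_not]; omega
  rw [hd]
  simp only [Bool.false_and, Bool.and_false]

-- ===== VERDICT (by name: the statement is the Claim_ definition above) =====
theorem solve_spec : Claim_unchanged_solve := by
  intro n _ hD
  unfold D_solve at hD
  show solve n = solve_alt n
  rcases lt_trichotomy n 0 with hneg | hz | hpos
  · rw [solve_neg n hneg]
    unfold solve_alt
    rw [if_pos (by omega)]
  · exact absurd hz hD
  · by_cases he : n % 2 = 0
    · -- n > 0 and even
      unfold solve
      rw [mod_two, if_neg (by simp [he])]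
      rw [loopA_spec n.toNat n (le_refl _) (by omega) he n 0 0]
      rw [← allEven_shift n (by omega) he]
      unfold solve_alt
      rw [if_neg (by omega : ¬ n ≤ 0)]
      have hallmod : ((digitsB n).all fun d => decide (PySem.Int.mod d 2 = 0)) =
          ((digitsB n).all fun d => decide (d % 2 = 0)) := by
        simp only [mod_two]
      rw [hallmod]
      by_cases hall : ((digitsB n).all fun d => decide (d % 2 = 0)) = true
      · rw [if_pos hall, hall]
        rw [revAcc_eq]
        have hval : fromDigits (digitsB n) = n := fromDigits_digitsB n (by omega)
        have hiff : (fromDigits ((digitsB n).reverse) = n) ↔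
            (digitsB n = (digitsB n).reverse) := by
          constructor
          · intro hv
            exact fromDigits_inj (digitsB n) ((digitsB n).reverse) (by simp)
              (digitsB_bounds n)
              (fun d hd => digitsB_bounds n d (List.mem_reverse.mp hd))
              (by rw [hval, hv])
          · intro hrev
            rw [← hrev, hval]
        rw [show ((0:Int) * 10 ^ (digitsB n).length + fromDigits ((digitsB n).reverse))
            = fromDigits ((digitsB n).reverse) by ring]
        by_cases hpar : ((digitsB n).length : Int) % 2 = 1
        · rw [if_pos (by omega : ((0:Int) + ((digitsB n).length : Int)) % 2 = 1)]
          have hlf : decide (((digitsB n).length : Int) % 2 = 0) = false := by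
            rw [decide_eq_false_iff_not]; omega
          rw [hlf]
          simp only [Bool.false_and]
        · rw [if_neg (by omega : ¬ ((0:Int) + ((digitsB n).length : Int)) % 2 = 1)]
          have hlen : decide (((digitsB n).length : Int) % 2 = 0) = true := by
            rw [decide_eq_true_eq]; omega
          simp only [hlen, Bool.true_and, Bool.and_true]
          exact Bool.decide_congr hiff
      · rw [if_neg hall]
        have hf : ((digitsB n).all fun d => decide (d % 2 = 0)) = false := by
          exact Bool.eq_false_iff.mpr hall
        rw [hf]
        simp only [Bool.and_false, Bool.false_and]
    · have hodd : n % 2 = 1 := by omega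
      rw [alt_odd n hpos hodd]
      unfold solve
      rw [mod_two, if_pos (by simp [hodd])]

theorem solve_changed : Claim_changed_solve := by
  unfold Claim_changed_solve pvDiffWitness_solve pvDiffWitnessOut_solve
  refine ⟨by decide, by decide, ?_, ?_, by decide⟩
  · unfold solve
    rw [mod_two, if_neg (by norm_num)]
    rw [solveLoopA, dif_neg (by norm_num), mod_two]
    norm_num
  · unfold solve_alt
    norm_num

theorem solve_tight : Claim_exact_solve := by
  intro n _ hD
  unfold D_solve at hD
  subst hD
  have hA : solve 0 = true := by
    unfold solve
    rw [mod_two, if_neg (by norm_num)]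
    rw [solveLoopA, dif_neg (by norm_num), mod_two]
    norm_num
  have hB : solve_alt 0 = false := by
    unfold solve_alt; norm_num
  rw [hA, hB]
  simp
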